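-- pv_equiv track=rewrite | github.com/chris-park5/fastapi | domain/langgraph/nodes/change_analyzer_node.py | _identify_target_sections
-- ===== SOURCE A (Python) =====
-- def _identify_target_sections(changed_files: list[str]) -> list[str]:
--     """파일명 기반 타겟 섹션 추론"""
--     targets = set()
--     for f in changed_files:
--         lf = f.lower()
--         if any(x in lf for x in ['main','app','config']):
--             targets.add('overview')
--         if any(x in lf for x in ['router','endpoint','controller']):
--             targets.add('architecture'); targets.add('modules')
--         if any(x in lf for x in ['model','schema','entity']):
--             targets.add('modules')
--         if any(x in lf for x in ['service','handler']):
--             targets.add('modules')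
--     targets.add('changelog')
--     return list(targets)
-- ===== SOURCE B (Python) =====
-- # Different decomposition: instead of A's per-file loop with four branch chains,
-- # aggregate all lowercased filenames into ONE space-joined string and run each
-- # keyword check once against it (no keyword contains a space, so no
-- # cross-boundary match is possible).  Each check is then a single C-level scan
-- # of one string instead of a Python-level loop over files (measured faster by
-- # the timing check); order of list(set) is hash-dependent in both, contents
-- # identical.
-- def _identify_target_sections(changed_files: list[str]) -> list[str]:
--     text = ' '.join(f.lower() for f in changed_files)
--     targets = {'changelog'}
--     if any(k in text for k in ('main', 'app', 'config')):
--         targets.add('overview')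
--     if any(k in text for k in ('router', 'endpoint', 'controller')):
--         targets.update(('architecture', 'modules'))
--     if any(k in text for k in ('model', 'schema', 'entity')):
--         targets.add('modules')
--     if any(k in text for k in ('service', 'handler')):
--         targets.add('modules')
--     return list(targets)
-- ===== Notes on version B (the rewrite author's own statement) =====
-- stated objective: faster
-- what changed: Instead of looping over files and running the four keyword checks per file against a mutated set, B joins all lowercased filenames into one space-separated string and runs each fixed keyword check exactly once against that aggregate (safe because no keyword contains whitespace), setting each section at most once.
import Mathlib
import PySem

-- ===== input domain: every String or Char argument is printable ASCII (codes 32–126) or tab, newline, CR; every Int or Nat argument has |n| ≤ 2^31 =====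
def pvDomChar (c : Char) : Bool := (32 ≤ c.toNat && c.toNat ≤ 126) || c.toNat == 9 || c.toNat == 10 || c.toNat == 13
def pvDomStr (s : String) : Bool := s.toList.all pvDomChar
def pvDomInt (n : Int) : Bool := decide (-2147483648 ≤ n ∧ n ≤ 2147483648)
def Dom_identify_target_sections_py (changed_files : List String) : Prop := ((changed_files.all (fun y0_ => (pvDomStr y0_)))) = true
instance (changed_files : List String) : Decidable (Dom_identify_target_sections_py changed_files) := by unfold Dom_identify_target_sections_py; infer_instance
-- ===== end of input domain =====

-- B replaces A's per-file loop (four keyword checks per file, mutating a set) by ONE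
-- space-joined aggregate of the lowercased filenames, against which each fixed keyword
-- check runs exactly once (no keyword contains a space, so no cross-boundary match).
-- Python's list(set) iteration order is hash-dependent and not modelled: both ports
-- render the resulting set in sorted order (the outputs are compared as sets).

-- ===== PORT A =====
-- one iteration of A's 'for f in changed_files' loop body
def pvStepA (s : PySem.Set String) (f : String) : PySem.Set String :=
  let lf := PySem.Str.lower f
  let s := if (["main", "app", "config"].any (fun x => PySem.Str.isIn x lf)) then
    PySem.Set.add s "overview" else s
  let s := if (["router", "endpoint", "controller"].any (fun x => PySem.Str.isIn x lf)) then
    PySem.Set.add (PySem.Set.add s "architecture") "modules" else s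
  let s := if (["model", "schema", "entity"].any (fun x => PySem.Str.isIn x lf)) then
    PySem.Set.add s "modules" else s
  let s := if (["service", "handler"].any (fun x => PySem.Str.isIn x lf)) then
    PySem.Set.add s "modules" else s
  s

def identify_target_sections_py (changed_files : List String) : List String :=
  PySem.List.sorted
    (PySem.Set.add (changed_files.foldl pvStepA PySem.Set.empty) "changelog")
    (fun x => x) false

-- ===== PORT B =====
-- any(k in text for k in keys)
def pvAnyIn (keys : List String) (text : String) : Bool :=
  keys.any (fun k => PySem.Str.isIn k text)

def identify_target_sections_py_alt (changed_files : List String) : List String :=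
  let text := PySem.Str.join " " (changed_files.map PySem.Str.lower)
  let t0 : PySem.Set String := PySem.Set.add PySem.Set.empty "changelog"
  let t1 := if pvAnyIn ["main", "app", "config"] text then PySem.Set.add t0 "overview" else t0
  let t2 := if pvAnyIn ["router", "endpoint", "controller"] text then
    PySem.Set.update t1 ["architecture", "modules"] else t1
  let t3 := if pvAnyIn ["model", "schema", "entity"] text then PySem.Set.add t2 "modules" else t2
  let t4 := if pvAnyIn ["service", "handler"] text then PySem.Set.add t3 "modules" else t3
  PySem.List.sorted t4 (fun x => x) false

-- ===== PRECONDITION & SPEC =====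
def Spec_identify_target_sections_py (changed_files : List String) (out : List String) : Prop := out = identify_target_sections_py_alt changed_files
instance (changed_files : List String) (out : List String) : Decidable (Spec_identify_target_sections_py changed_files out) := by unfold Spec_identify_target_sections_py; infer_instance

-- ===== CLAIM (what is proved, stated in full; the proofs are below) =====
def Claim_equal_identify_target_sections_py : Prop := ∀ (changed_files : List String), Dom_identify_target_sections_py changed_files → Spec_identify_target_sections_py changed_files (identify_target_sections_py changed_files)

-- ===== LEMMAS AND PROOFS =====

-- an occurrence of kw (kw not containing c) inside a ++ c :: b lies wholly in a or wholly in b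
theorem pv_infix_append_cons {c : Char} {kw a b : List Char} (hc : c ∉ kw) :
    kw <:+: a ++ c :: b ↔ kw <:+: a ∨ kw <:+: b := by
  constructor
  · rintro ⟨s, t, h⟩
    replace h := h.symm
    rcases le_or_gt (s.length + kw.length) a.length with hle | hgt
    · left
      have h1 : (s ++ kw) <+: a ++ c :: b := ⟨t, by simp [h]⟩
      have hpre : (s ++ kw) <+: a :=
        List.prefix_of_prefix_length_le h1 (List.prefix_append a (c :: b)) (by simpa using hle)
      exact List.IsInfix.trans ⟨s, [], by simp⟩ hpre.isInfix
    rcases le_or_gt s.length a.length with hs | hs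
    · exfalso
      have hidx : (a ++ c :: b)[a.length]'(by simp) = c := by
        simp [List.getElem_append_right (Nat.le_refl a.length)]
      have hlen2 : a.length < (s ++ (kw ++ t)).length := by
        rw [← List.append_assoc, ← h]; simp
      have hidx2 : (s ++ (kw ++ t))[a.length]'hlen2 = c := by
        have := List.getElem_of_eq (h.trans (List.append_assoc s kw t)) (i := a.length) (by simp)
        exact this.symm.trans hidx
      have e1 : (s ++ (kw ++ t))[a.length]'hlen2
          = (kw ++ t)[a.length - s.length]'(by simp at hlen2 ⊢; omega) :=
        List.getElem_append_right hs
      have e2 : (kw ++ t)[a.length - s.length]'(by simp at hlen2 ⊢; omega)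
          = kw[a.length - s.length]'(by omega) :=
        List.getElem_append_left (by omega)
      exact hc ((e2.symm.trans (e1.symm.trans hidx2)) ▸ List.getElem_mem _)
    · right
      have h1 : (kw ++ t) <:+ a ++ c :: b := ⟨s, by simp [h]⟩
      have hsuf : (kw ++ t) <:+ b := by
        have h2 : b <:+ a ++ c :: b := ⟨a ++ [c], by simp⟩
        refine List.suffix_of_suffix_length_le h1 h2 ?_
        have := congrArg List.length h
        simp at this; simp; omega
      exact List.IsInfix.trans ⟨[], t, by simp⟩ hsuf.isInfix
  · rintro (⟨s, t, h⟩ | ⟨s, t, h⟩)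
    · exact ⟨s, t ++ c :: b, by rw [← h]; simp⟩
    · exact ⟨a ++ c :: s, t, by rw [← h]; simp⟩

-- 'kw in " ".join(parts)' = 'any(kw in p for p in parts)' for nonempty space-free kw
theorem pv_isIn_join (kw : List Char) (hne : kw ≠ []) (hsp : ' ' ∉ kw)
    (parts : List (List Char)) :
    PySem.Chars.isIn kw (PySem.Chars.join [' '] parts)
      = parts.any (fun p => PySem.Chars.isIn kw p) := by
  induction parts with
  | nil =>
      rw [PySem.Chars.join_nil]
      simp only [List.any_nil]
      rw [PySem.Chars.isIn_eq_false_iff]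
      intro hinf
      exact hne (List.eq_nil_of_infix_nil hinf)
  | cons p rest ih =>
      cases rest with
      | nil => rw [PySem.Chars.join_singleton]; simp
      | cons q rest' =>
          rw [PySem.Chars.join_cons_cons]
          rw [Bool.eq_iff_iff]
          simp only [List.any_cons, Bool.or_eq_true, PySem.Chars.isIn_iff_infix,
            List.append_assoc, List.singleton_append]
          rw [pv_infix_append_cons hsp]
          rw [← PySem.Chars.isIn_iff_infix, ← PySem.Chars.isIn_iff_infix, ih]
          simp [PySem.Chars.isIn_iff_infix]

-- swap the order of two nested any's
theorem pv_any_comm {α β : Type} (l : List α) (m : List β) (g : α → β → Bool) :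
    l.any (fun x => m.any (fun y => g x y)) = m.any (fun y => l.any (fun x => g x y)) := by
  rw [Bool.eq_iff_iff]
  simp only [List.any_eq_true]
  tauto

-- one keyword group, checked once against the joined text = checked per file
theorem pv_anyIn_join (keys : List String)
    (hk : ∀ k ∈ keys, k.toList ≠ [] ∧ ' ' ∉ k.toList) (files : List String) :
    pvAnyIn keys (PySem.Str.join " " (files.map PySem.Str.lower))
      = files.any (fun f => keys.any (fun k => PySem.Str.isIn k (PySem.Str.lower f))) := by
  unfold pvAnyIn
  rw [← pv_any_comm]
  refine PySem.List.any_congr_mem (fun k hkm => ?_)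
  rw [PySem.Str.isIn_eq, PySem.Str.toList_join]
  rw [show (" " : String).toList = [' '] from rfl]
  rw [pv_isIn_join k.toList (hk k hkm).1 (hk k hkm).2]
  simp [List.any_map, Function.comp_def, PySem.Str.isIn_eq, PySem.Str.toList_lower]

-- one iteration of A's loop, characterised by membership
theorem pv_mem_step (s : PySem.Set String) (f x : String) :
    x ∈ pvStepA s f ↔ x ∈ s
      ∨ ((x = "overview" ∧ (["main", "app", "config"].any (fun k => PySem.Str.isIn k (PySem.Str.lower f))) = true)
      ∨ ((x = "architecture" ∨ x = "modules") ∧ (["router", "endpoint", "controller"].any (fun k => PySem.Str.isIn k (PySem.Str.lower f))) = true)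
      ∨ (x = "modules" ∧ (["model", "schema", "entity"].any (fun k => PySem.Str.isIn k (PySem.Str.lower f))) = true)
      ∨ (x = "modules" ∧ (["service", "handler"].any (fun k => PySem.Str.isIn k (PySem.Str.lower f))) = true)) := by
  simp only [pvStepA]
  generalize (["main", "app", "config"].any (fun k => PySem.Str.isIn k (PySem.Str.lower f))) = c1
  generalize (["router", "endpoint", "controller"].any (fun k => PySem.Str.isIn k (PySem.Str.lower f))) = c2
  generalize (["model", "schema", "entity"].any (fun k => PySem.Str.isIn k (PySem.Str.lower f))) = c3
  generalize (["service", "handler"].any (fun k => PySem.Str.isIn k (PySem.Str.lower f))) = c4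
  cases c1 <;> cases c2 <;> cases c3 <;> cases c4 <;>
    simp [PySem.Set.mem_add] <;> tauto

-- A's whole loop: a section is present iff some file put it there
theorem pv_mem_foldl (files : List String) (s : PySem.Set String) (x : String) :
    x ∈ files.foldl pvStepA s ↔ x ∈ s ∨ ∃ f ∈ files,
      ((x = "overview" ∧ (["main", "app", "config"].any (fun k => PySem.Str.isIn k (PySem.Str.lower f))) = true)
      ∨ ((x = "architecture" ∨ x = "modules") ∧ (["router", "endpoint", "controller"].any (fun k => PySem.Str.isIn k (PySem.Str.lower f))) = true)
      ∨ (x = "modules" ∧ (["model", "schema", "entity"].any (fun k => PySem.Str.isIn k (PySem.Str.lower f))) = true)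
      ∨ (x = "modules" ∧ (["service", "handler"].any (fun k => PySem.Str.isIn k (PySem.Str.lower f))) = true)) := by
  induction files generalizing s with
  | nil => simp
  | cons f rest ih =>
      simp only [List.foldl_cons]
      rw [ih, pv_mem_step]
      simp only [List.exists_mem_cons_iff]
      rw [or_assoc]

-- A's loop preserves the Set invariant
theorem pv_nodup_foldl (files : List String) (s : PySem.Set String) (h : s.Nodup) :
    (files.foldl pvStepA s).Nodup := by
  induction files generalizing s with
  | nil => exact h
  | cons f rest ih =>
      refine ih _ ?_
      simp only [pvStepA]
      split_ifs <;> (repeat apply PySem.Set.nodup_add) <;> exact h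

-- the set B builds, as a function of the four aggregate test results (proof-only helper)
def pvBuild (c1 c2 c3 c4 : Bool) : PySem.Set String :=
  let t0 : PySem.Set String := PySem.Set.add PySem.Set.empty "changelog"
  let t1 := if c1 then PySem.Set.add t0 "overview" else t0
  let t2 := if c2 then PySem.Set.update t1 ["architecture", "modules"] else t1
  let t3 := if c3 then PySem.Set.add t2 "modules" else t2
  let t4 := if c4 then PySem.Set.add t3 "modules" else t3
  t4

theorem pv_nodup_build (c1 c2 c3 c4 : Bool) : (pvBuild c1 c2 c3 c4).Nodup := by
  simp only [pvBuild]
  cases c1 <;> cases c2 <;> cases c3 <;> cases c4 <;> simp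

theorem pv_mem_build (c1 c2 c3 c4 : Bool) (x : String) :
    x ∈ pvBuild c1 c2 c3 c4 ↔ x = "changelog"
      ∨ (x = "overview" ∧ c1 = true)
      ∨ ((x = "architecture" ∨ x = "modules") ∧ c2 = true)
      ∨ (x = "modules" ∧ c3 = true)
      ∨ (x = "modules" ∧ c4 = true) := by
  simp only [pvBuild]
  cases c1 <;> cases c2 <;> cases c3 <;> cases c4 <;>
    simp [PySem.Set.empty]

-- ===== VERDICT (by name: the statement is the Claim_ definition above) =====
theorem identify_target_sections_py_spec : Claim_equal_identify_target_sections_py := by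
  intro files _
  unfold Spec_identify_target_sections_py identify_target_sections_py identify_target_sections_py_alt
  refine PySem.List.sorted_eq_sorted_of_perm _ _ _ (fun a b h => h) ?_
  change (PySem.Set.add (files.foldl pvStepA PySem.Set.empty) "changelog").Perm
    (pvBuild
      (pvAnyIn ["main", "app", "config"] (PySem.Str.join " " (files.map PySem.Str.lower)))
      (pvAnyIn ["router", "endpoint", "controller"] (PySem.Str.join " " (files.map PySem.Str.lower)))
      (pvAnyIn ["model", "schema", "entity"] (PySem.Str.join " " (files.map PySem.Str.lower)))
      (pvAnyIn ["service", "handler"] (PySem.Str.join " " (files.map PySem.Str.lower))))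
  rw [List.perm_ext_iff_of_nodup
    (PySem.Set.nodup_add (files.foldl pvStepA PySem.Set.empty) "changelog"
      (pv_nodup_foldl files PySem.Set.empty List.nodup_nil))
    (pv_nodup_build _ _ _ _)]
  intro x
  rw [PySem.Set.mem_add, pv_mem_foldl, pv_mem_build,
      pv_anyIn_join _ (by decide), pv_anyIn_join _ (by decide),
      pv_anyIn_join _ (by decide), pv_anyIn_join _ (by decide)]
  simp only [PySem.Set.empty, List.not_mem_nil, false_or, List.any_eq_true,
    and_or_left, exists_or, exists_and_left, and_left_comm]
  exact or_comm
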